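-- pv_equiv track=rewrite | github.com/swill187/DCP2 | data_manipulation.py | getStartStop
-- ===== SOURCE A (Python) =====
-- def getStartStop(testVal, testLimit = 1):
--
--     startTime = 0
--     for t, v in enumerate(testVal):
--         if v > testLimit:
--             startTime = t
--             break
--
--     stopTime = 0
--     for t, v in enumerate(testVal):
--         if t < startTime:
--             continue
--
--         if testVal[t - 1] >=  testLimit and v < testLimit:
--             stopTime = t
--
--     if stopTime == 0: stopTime = len(testVal)
--
--     return startTime, stopTime
-- ===== SOURCE B (Python) =====
-- def getStartStop(testVal, testLimit=1):
--     n = len(testVal)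
--     startTime = 0
--     for t in range(n):
--         if testVal[t] > testLimit:
--             startTime = t
--             break
--     stopTime = n
--     for t in range(n - 1, startTime - 1, -1):
--         if testVal[t - 1] >= testLimit and testVal[t] < testLimit:
--             if t != 0:
--                 stopTime = t
--             break
--     return startTime, stopTime
-- ===== Notes on version B (the rewrite author's own statement) =====
-- stated objective: alternative
-- what changed: The stop index is found by an early-terminating backward scan from the end of the list (first falling edge seen from the right) instead of A's full forward pass that keeps overwriting stopTime.
import Mathlib
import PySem

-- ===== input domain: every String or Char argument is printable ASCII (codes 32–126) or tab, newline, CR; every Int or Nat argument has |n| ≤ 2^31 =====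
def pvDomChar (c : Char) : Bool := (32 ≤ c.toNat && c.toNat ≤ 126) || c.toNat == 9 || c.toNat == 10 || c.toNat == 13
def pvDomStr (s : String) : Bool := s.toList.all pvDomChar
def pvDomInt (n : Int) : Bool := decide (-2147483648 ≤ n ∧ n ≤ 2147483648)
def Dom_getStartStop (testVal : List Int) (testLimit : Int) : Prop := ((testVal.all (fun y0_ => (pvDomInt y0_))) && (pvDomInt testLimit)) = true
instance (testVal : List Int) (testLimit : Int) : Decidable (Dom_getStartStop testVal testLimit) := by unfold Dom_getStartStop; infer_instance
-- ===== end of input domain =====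

-- B replaces A's full second forward pass (overwriting stopTime) by an early-exiting
-- backward scan from the end that stops at the first (= last) falling edge: alternative decomposition.

-- ===== PORT A =====
-- first loop of A: walk enumerate(testVal), break at the first v > testLimit (else startTime stays 0)
def aFindStart (testLimit : Int) : List (Int × Int) → Int
  | [] => 0
  | (t, v) :: rest => if v > testLimit then t else aFindStart testLimit rest

def getStartStop (testVal : List Int) (testLimit : Int) : Int × Int :=
  let startTime := aFindStart testLimit (PySem.List.enumerate testVal 0)
  -- second loop of A: full forward pass, skip t < startTime, overwrite stopTime at each falling edge
  let stopTime := (PySem.List.enumerate testVal 0).foldl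
    (fun stop tv =>
      if tv.1 < startTime then stop
      else if PySem.List.pyGetD testVal (tv.1 - 1) 0 ≥ testLimit ∧ tv.2 < testLimit then tv.1
      else stop) 0
  let stopTime := if stopTime = 0 then (testVal.length : Int) else stopTime
  (startTime, stopTime)

-- ===== PORT B =====
-- B's first loop: for t in range(n), break at the first testVal[t] > testLimit
def bFindStart (testVal : List Int) (testLimit : Int) : List Int → Int
  | [] => 0
  | t :: rest => if PySem.List.pyGetD testVal t 0 > testLimit then t else bFindStart testVal testLimit rest

-- B's backward loop: first t (scanning range(n-1, startTime-1, -1)) with a falling edge; break there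
def bFindStop (testVal : List Int) (testLimit n : Int) : List Int → Int
  | [] => n
  | t :: rest =>
      if PySem.List.pyGetD testVal (t - 1) 0 ≥ testLimit ∧ PySem.List.pyGetD testVal t 0 < testLimit then
        (if t ≠ 0 then t else n)
      else bFindStop testVal testLimit n rest

def getStartStop_alt (testVal : List Int) (testLimit : Int) : Int × Int :=
  let n : Int := testVal.length
  let startTime := bFindStart testVal testLimit (PySem.List.pyRange 0 n 1)
  let stopTime := bFindStop testVal testLimit n (PySem.List.pyRange (n - 1) (startTime - 1) (-1))
  (startTime, stopTime)

-- ===== PRECONDITION & SPEC =====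
def Spec_getStartStop (testVal : List Int) (testLimit : Int) (out : Int × Int) : Prop := out = getStartStop_alt testVal testLimit
instance (testVal : List Int) (testLimit : Int) (out : Int × Int) : Decidable (Spec_getStartStop testVal testLimit out) := by unfold Spec_getStartStop; infer_instance

-- ===== CLAIM (what is proved, stated in full; the proofs are below) =====
def Claim_equal_getStartStop : Prop := ∀ (testVal : List Int) (testLimit : Int), Dom_getStartStop testVal testLimit → Spec_getStartStop testVal testLimit (getStartStop testVal testLimit)

-- ===== LEMMAS AND PROOFS =====

-- enumerate(xs) seen as indices of the whole list: enumerate xs |pre| = range mapped to (t, (pre++xs)[t])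
theorem enum_eq_map (xs : List Int) : ∀ (pre : List Int),
    PySem.List.enumerate xs (pre.length : Int) =
      (PySem.List.pyRange (pre.length : Int) ((pre.length : Int) + xs.length) 1).map
        (fun t => (t, PySem.List.pyGetD (pre ++ xs) t 0)) := by
  induction xs with
  | nil => intro pre; simp [PySem.List.enumerate_nil, PySem.List.pyRange_one_eq_nil]
  | cons x xs ih =>
    intro pre
    rw [PySem.List.enumerate_cons, PySem.List.pyRange_one_cons (by simp only [List.length_cons]; omega)]
    have h1 : PySem.List.pyGetD (pre ++ x :: xs) (pre.length : Int) 0 = x := by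
      simp [PySem.List.pyGetD_natCast, List.getD]
    have h2 := ih (pre ++ [x])
    simp only [List.length_append, List.length_singleton] at h2
    push_cast at h2 ⊢
    rw [List.map_cons, h1]
    rw [show ((pre.length : Int) + 1 + (xs.length : Int)) = (pre.length : Int) + (1 + xs.length) by ring] at h2
    rw [show (pre ++ [x]) ++ xs = pre ++ x :: xs by simp] at h2
    rw [show ((pre.length : Int) + ((x :: xs).length : Int)) = (pre.length : Int) + (1 + (xs.length : Int)) by simp only [List.length_cons]; push_cast; ring]
    rw [h2]

theorem enum_eq_map0 (xs : List Int) :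
    PySem.List.enumerate xs 0 =
      (PySem.List.pyRange 0 (xs.length : Int) 1).map (fun t => (t, PySem.List.pyGetD xs t 0)) := by
  have := enum_eq_map xs []
  simpa using this

-- the two start scans agree
theorem start_eq (xs : List Int) (lim : Int) (l : List Int) :
    aFindStart lim (l.map (fun t => (t, PySem.List.pyGetD xs t 0))) = bFindStart xs lim l := by
  induction l with
  | nil => rfl
  | cons t rest ih => simp [aFindStart, bFindStart, ih]

theorem bFindStart_mem_or_zero (xs : List Int) (lim : Int) (l : List Int) :
    bFindStart xs lim l = 0 ∨ bFindStart xs lim l ∈ l := by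
  induction l with
  | nil => left; rfl
  | cons t rest ih =>
    by_cases h : PySem.List.pyGetD xs t 0 > lim
    · right; simp [bFindStart, h]
    · rcases ih with h0 | hm
      · left; simpa [bFindStart, h]
      · right; simp [bFindStart, h, hm]

-- A's skipping forward fold characterised via find? on the reversed in-range segment
theorem foldl_last_match (c : Int → Bool) :
    ∀ (l : List Int) (a : Int),
      l.foldl (fun acc t => if c t then t else acc) a =
        (match l.reverse.find? c with | some t => t | none => a) := by
  intro l
  induction l using List.reverseRecOn with
  | nil => intro a; rfl
  | append_singleton l x ih =>
    intro a
    rw [List.foldl_append]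
    simp only [List.foldl_cons, List.foldl_nil, List.reverse_append, List.reverse_singleton,
      List.singleton_append, List.find?]
    by_cases h : c x
    · simp [h]
    · simp [h, ih a]

theorem foldl_skip_prefix (s : Int) (f : Int → Int → Int) :
    ∀ (l : List Int) (a : Int), (∀ t ∈ l, t < s) →
      l.foldl (fun acc t => if t < s then acc else f acc t) a = a := by
  intro l
  induction l with
  | nil => intro a _; rfl
  | cons t rest ih =>
    intro a h
    have ht : t < s := h t (by simp)
    simp only [List.foldl_cons, if_pos ht]
    exact ih a (fun u hu => h u (by simp [hu]))

theorem foldl_no_skip (s : Int) (c : Int → Bool) :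
    ∀ (l : List Int) (a : Int), (∀ t ∈ l, s ≤ t) →
      l.foldl (fun acc t => if t < s then acc else if c t then t else acc) a =
        l.foldl (fun acc t => if c t then t else acc) a := by
  intro l
  induction l with
  | nil => intro a _; rfl
  | cons t rest ih =>
    intro a h
    have ht : ¬ t < s := not_lt.mpr (h t (by simp))
    simp only [List.foldl_cons, if_neg ht]
    exact ih _ (fun u hu => h u (by simp [hu]))

-- B's backward scan characterised via find?
theorem bFindStop_eq_find (xs : List Int) (lim n : Int) (l : List Int) :
    bFindStop xs lim n l =
      (match l.find? (fun t => decide (PySem.List.pyGetD xs (t - 1) 0 ≥ lim ∧ PySem.List.pyGetD xs t 0 < lim)) with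
        | some t => (if t ≠ 0 then t else n)
        | none => n) := by
  induction l with
  | nil => rfl
  | cons t rest ih =>
    by_cases h : PySem.List.pyGetD xs (t - 1) 0 ≥ lim ∧ PySem.List.pyGetD xs t 0 < lim
    · simp [bFindStop, h, List.find?]
    · simp [bFindStop, h, List.find?, ih]

-- ===== VERDICT (by name: the statement is the Claim_ definition above) =====
theorem getStartStop_spec : Claim_equal_getStartStop := by
  intro xs lim _
  simp only [Spec_getStartStop, getStartStop, getStartStop_alt]
  set n : Int := (xs.length : Int) with hn
  -- the two start values agree
  have hstart : aFindStart lim (PySem.List.enumerate xs 0) =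
      bFindStart xs lim (PySem.List.pyRange 0 n 1) := by
    rw [enum_eq_map0, start_eq]
  set s := bFindStart xs lim (PySem.List.pyRange 0 n 1) with hs
  have hsbnd : 0 ≤ s ∧ s ≤ n := by
    rcases bFindStart_mem_or_zero xs lim (PySem.List.pyRange 0 n 1) with h0 | hm
    · have hn0 : (0:Int) ≤ n := by simp [hn]
      exact ⟨le_of_eq h0.symm, by omega⟩
    · rw [PySem.List.mem_pyRange_one] at hm; omega
  set c : Int → Bool := fun t => decide (PySem.List.pyGetD xs (t - 1) 0 ≥ lim ∧ PySem.List.pyGetD xs t 0 < lim) with hc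
  -- A's second loop over enumerate, as a fold over the index range
  have hA : (PySem.List.enumerate xs 0).foldl
      (fun stop tv => if tv.1 < s then stop
        else if PySem.List.pyGetD xs (tv.1 - 1) 0 ≥ lim ∧ tv.2 < lim then tv.1 else stop) 0 =
      (match (PySem.List.pyRange s n 1).reverse.find? c with | some t => t | none => 0) := by
    rw [enum_eq_map0, List.foldl_map]
    have hsplit : PySem.List.pyRange 0 n 1 = PySem.List.pyRange 0 s 1 ++ PySem.List.pyRange s n 1 :=
      PySem.List.pyRange_one_append 0 s n hsbnd.1 hsbnd.2
    rw [← hn, hsplit, List.foldl_append]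
    have heq : ((PySem.List.pyRange 0 s 1).foldl
        (fun stop t => if t < s then stop
          else if PySem.List.pyGetD xs (t - 1) 0 ≥ lim ∧ PySem.List.pyGetD xs t 0 < lim then t else stop) 0) = 0 := by
      exact foldl_skip_prefix s _ _ 0
        (fun t ht => ((PySem.List.mem_pyRange_one).1 ht).2)
    rw [heq]
    have h2 := foldl_no_skip s c (PySem.List.pyRange s n 1) 0
      (fun t ht => ((PySem.List.mem_pyRange_one).1 ht).1)
    simp only [hc, decide_eq_true_eq] at h2
    rw [h2, ← foldl_last_match c]
    simp [hc]
  rw [hstart, hA]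
  -- B's backward range is the reverse of the in-range ascending segment
  have hrev : PySem.List.pyRange (n - 1) (s - 1) (-1) = (PySem.List.pyRange s n 1).reverse := by
    rw [PySem.List.pyRange_neg_one_eq_reverse]
    congr 1; ring_nf
  rw [bFindStop_eq_find, hrev, ← hc]
  -- now case on the find? result
  cases hfind : (PySem.List.pyRange s n 1).reverse.find? c with
  | none => simp
  | some t =>
    have ht : t ∈ PySem.List.pyRange s n 1 := by
      have := List.mem_of_find?_eq_some hfind
      simpa using this
    have hb := (PySem.List.mem_pyRange_one).1 ht
    by_cases h0 : t = 0
    · simp [h0]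
    · have : t ≠ 0 := h0
      simp [this]
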